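-- pv_equiv track=rewrite | github.com/pulilohith/hash | prob.py | minimumdeletionoper
-- ===== SOURCE A (Python) =====
-- def minimumdeletionoper(arr):
--     mp=[]
--     count=0
--     for i in arr:
--         if(i not in mp):
--             count+=1
--         mp.append(i)
--     return count-1
-- ===== SOURCE B (Python) =====
-- def minimumdeletionoper(arr):
--     s = sorted(arr)
--     distinct = 0
--     last = None
--     for x in s:
--         if distinct == 0 or x != last:
--             distinct += 1
--         last = x
--     return distinct - 1
-- ===== Notes on version B (the rewrite author's own statement) =====
-- stated objective: faster
-- what changed: Replaces the per-element membership scan of a growing list with sort-then-single-pass counting of adjacent changes.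
import Mathlib
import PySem

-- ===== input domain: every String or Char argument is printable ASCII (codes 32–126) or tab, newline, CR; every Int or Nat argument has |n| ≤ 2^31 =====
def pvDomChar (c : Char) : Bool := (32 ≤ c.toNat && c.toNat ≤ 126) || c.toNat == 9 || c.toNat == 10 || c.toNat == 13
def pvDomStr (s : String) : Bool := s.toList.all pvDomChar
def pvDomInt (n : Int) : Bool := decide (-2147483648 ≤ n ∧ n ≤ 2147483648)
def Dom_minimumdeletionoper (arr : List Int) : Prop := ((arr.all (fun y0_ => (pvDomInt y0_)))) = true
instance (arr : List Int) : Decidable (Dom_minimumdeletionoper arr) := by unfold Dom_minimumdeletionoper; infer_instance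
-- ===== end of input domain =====

-- B replaces A's quadratic per-element membership scan by sort + one pass counting adjacent changes.

-- ===== PORT A =====
-- for i in arr: if i not in mp: count += 1; mp.append(i)
def minimumdeletionoper (arr : List Int) : Int :=
  (arr.foldl (fun (p : List Int × Int) i =>
      (p.1 ++ [i], if i ∈ p.1 then p.2 else p.2 + 1)) ([], 0)).2 - 1

-- ===== PORT B =====
-- s = sorted(arr); for x in s: if distinct == 0 or x != last: distinct += 1; last = x
def minimumdeletionoper_alt (arr : List Int) : Int :=
  ((PySem.List.sorted arr (fun x => x) false).foldl
      (fun (p : Option Int × Int) x =>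
        (some x, if p.2 = 0 ∨ p.1 ≠ some x then p.2 + 1 else p.2)) (none, 0)).2 - 1

-- ===== PRECONDITION & SPEC =====
def Spec_minimumdeletionoper (arr : List Int) (out : Int) : Prop := out = minimumdeletionoper_alt arr
instance (arr : List Int) (out : Int) : Decidable (Spec_minimumdeletionoper arr out) := by unfold Spec_minimumdeletionoper; infer_instance

-- ===== CLAIM (what is proved, stated in full; the proofs are below) =====
def Claim_equal_minimumdeletionoper : Prop := ∀ (arr : List Int), Dom_minimumdeletionoper arr → Spec_minimumdeletionoper arr (minimumdeletionoper arr)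

-- ===== LEMMAS AND PROOFS =====

-- A's loop: the running count is the number of distinct elements seen so far.
theorem pvA_fold (l : List Int) : ∀ (mp : List Int) (c : Int),
    (l.foldl (fun (p : List Int × Int) i =>
        (p.1 ++ [i], if i ∈ p.1 then p.2 else p.2 + 1)) (mp, c)).2
      = c + (((mp ++ l).toFinset.card : Int) - (mp.toFinset.card : Int)) := by
  induction l with
  | nil => intro mp c; simp
  | cons i l ih =>
    intro mp c
    simp only [List.foldl_cons]
    rw [ih (mp ++ [i])]
    have h1 : (mp ++ i :: l).toFinset = ((mp ++ [i]) ++ l).toFinset := by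
      simp
    by_cases hi : i ∈ mp
    · have h2 : (mp ++ [i]).toFinset = mp.toFinset := by
        simp [List.toFinset_append, Finset.insert_eq_self.2 (List.mem_toFinset.2 hi)]
      simp only [hi, if_pos, h1, h2]
    · have h2 : (mp ++ [i]).toFinset.card = mp.toFinset.card + 1 := by
        have he : (mp ++ [i]).toFinset = insert i mp.toFinset := by
          simp [List.toFinset_append]
        rw [he, Finset.card_insert_of_notMem (by simpa using hi)]
      simp only [hi, if_false, h1, h2]
      push_cast
      ring

-- B's loop on a sorted tail whose elements are all ≥ last: counts toFinset minus last.
theorem pvB_fold (l : List Int) : ∀ (last : Int) (c : Int), 1 ≤ c →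
    l.Pairwise (· ≤ ·) → (∀ y ∈ l, last ≤ y) →
    (l.foldl (fun (p : Option Int × Int) x =>
        (some x, if p.2 = 0 ∨ p.1 ≠ some x then p.2 + 1 else p.2)) (some last, c)).2
      = c + ((l.toFinset.erase last).card : Int) := by
  induction l with
  | nil => intro last c _ _ _; simp
  | cons x l ih =>
    intro last c hc hpw hge
    have hpw' := (List.pairwise_cons.1 hpw).2
    have hxl := (List.pairwise_cons.1 hpw).1
    have hc0 : c ≠ 0 := by omega
    simp only [List.foldl_cons]
    by_cases hx : x = last
    · subst hx
      simp only [hc0, ne_eq, not_true_eq_false, or_self, if_false]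
      rw [ih x c hc hpw' hxl]
      congr 2
      simp [Finset.erase_insert_eq_erase]
    · have hcond : (c = 0 ∨ ¬ some last = some x) := Or.inr (by simp [Ne.symm hx])
      simp only [if_pos hcond]
      rw [ih x (c + 1) (by omega) hpw' hxl]
      have hnot : last ∉ l.toFinset := by
        intro h
        have h1 := hxl last (List.mem_toFinset.1 h)
        have h2 : last < x := lt_of_le_of_ne (hge x List.mem_cons_self) (Ne.symm hx)
        omega
      have hE : ((x :: l).toFinset.erase last) = insert x l.toFinset := by
        rw [List.toFinset_cons, Finset.erase_eq_self.2 ?_]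
        simp only [Finset.mem_insert]
        push Not
        exact ⟨fun h => hx h.symm, hnot⟩
      rw [hE]
      by_cases hxin : x ∈ l.toFinset
      · rw [Finset.insert_eq_self.2 hxin, Finset.card_erase_of_mem hxin]
        have h1 : 1 ≤ l.toFinset.card := Finset.card_pos.2 ⟨x, hxin⟩
        push_cast [h1]
        ring
      · rw [Finset.card_insert_of_notMem hxin, Finset.erase_eq_self.2 hxin]
        push_cast
        ring

-- ===== VERDICT (by name: the statement is the Claim_ definition above) =====
theorem minimumdeletionoper_spec : Claim_equal_minimumdeletionoper := by
  intro arr _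
  unfold Spec_minimumdeletionoper minimumdeletionoper minimumdeletionoper_alt
  rw [pvA_fold arr [] 0]
  have hperm : (PySem.List.sorted arr (fun x => x) false).Perm arr :=
    PySem.List.sorted_perm ..
  have htf : (PySem.List.sorted arr (fun x => x) false).toFinset = arr.toFinset :=
    List.toFinset_eq_of_perm _ _ hperm
  have hpw : (PySem.List.sorted arr (fun x => x) false).Pairwise (· ≤ ·) := by
    simpa using PySem.List.sorted_pairwise arr (fun x => x)
  cases hs : PySem.List.sorted arr (fun x => x) false with
  | nil =>
      rw [hs] at htf
      simp at htf
      simp [htf]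
  | cons x t =>
      rw [hs] at htf hpw
      have hxle : ∀ y ∈ t, x ≤ y := (List.pairwise_cons.1 hpw).1
      simp only [List.foldl_cons]
      norm_num
      rw [pvB_fold t x 1 (by omega) (List.pairwise_cons.1 hpw).2 hxle]
      rw [← htf, List.toFinset_cons]
      by_cases hxin : x ∈ t.toFinset
      · rw [Finset.insert_eq_self.2 hxin, Finset.card_erase_of_mem hxin]
        have h1 : 1 ≤ t.toFinset.card := Finset.card_pos.2 ⟨x, hxin⟩
        push_cast [h1]
        ring
      · rw [Finset.card_insert_of_notMem hxin, Finset.erase_eq_self.2 hxin]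
        push_cast
        ring
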